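-- pv_equiv track=rewrite | github.com/kylie-box/HMM_Gene_Finding | parser.py | suppliment_codon_usage
-- ===== SOURCE A (Python) =====
-- NUCLEOTIDES = ['A', 'T', 'C', 'G']
--
-- def suppliment_codon_usage(freq_table):
--     for i in NUCLEOTIDES:
--         for j in NUCLEOTIDES:
--             for k in NUCLEOTIDES:
--                 try:
--                     _ = freq_table[str(i + j + k)]
--                 except KeyError:
--                     freq_table[str(i + j + k)] = 0
--                     continue
--     return freq_table
-- ===== SOURCE B (Python) =====
-- NUCLEOTIDES = ['A', 'T', 'C', 'G']
--
-- def _codon_index(key):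
--     """Base-4 number (0..63) of a 3-letter codon, or None if key is not a codon."""
--     if len(key) != 3:
--         return None
--     n = 0
--     for ch in key:
--         if ch not in NUCLEOTIDES:
--             return None
--         n = 4 * n + NUCLEOTIDES.index(ch)
--     return n
--
-- def suppliment_codon_usage(freq_table):
--     present = [False] * 64
--     for key in freq_table:
--         idx = _codon_index(key)
--         if idx is not None:
--             present[idx] = True
--     for n in range(64):
--         if not present[n]:
--             freq_table[NUCLEOTIDES[n // 16] + NUCLEOTIDES[n // 4 % 4] + NUCLEOTIDES[n % 4]] = 0
--     return freq_table
-- ===== Notes on version B (the rewrite author's own statement) =====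
-- stated objective: alternative
-- what changed: B replaces A's 64 try/except dict probes with a single pass over the existing keys that marks a 64-slot presence array indexed by each codon's base-4 number, then decodes the unset indices back to codon strings and inserts zero for exactly those; dict membership is never queried.
import Mathlib
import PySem

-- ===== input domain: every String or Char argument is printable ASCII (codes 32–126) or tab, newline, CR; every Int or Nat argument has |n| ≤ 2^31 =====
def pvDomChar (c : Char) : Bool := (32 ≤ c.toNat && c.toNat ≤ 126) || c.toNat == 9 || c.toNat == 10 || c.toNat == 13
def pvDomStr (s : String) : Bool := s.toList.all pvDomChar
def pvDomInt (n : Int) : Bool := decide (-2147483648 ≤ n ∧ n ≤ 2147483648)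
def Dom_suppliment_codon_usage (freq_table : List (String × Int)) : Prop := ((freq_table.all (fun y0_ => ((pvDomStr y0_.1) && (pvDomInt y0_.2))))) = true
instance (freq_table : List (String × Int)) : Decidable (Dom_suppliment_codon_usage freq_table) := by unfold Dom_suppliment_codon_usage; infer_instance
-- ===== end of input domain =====

-- B scans the existing keys once into a 64-slot presence array indexed by each codon's base-4
-- number and then inserts 0 for the unset indices (decoded back to strings), instead of A's
-- try/except probe of every codon against the dict; same return value and the same in-place
-- dict mutation (equivalence here is about the return value).

-- ===== PORT A =====
def pvNUC : List String := ["A", "T", "C", "G"]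

-- the try/except body: lookup, and on KeyError insert 0
def pvAStep (d : PySem.Dict String Int) (c : String) : PySem.Dict String Int :=
  match d.get? c with
  | some _ => d
  | none => d.insert c 0

def suppliment_codon_usage (freq_table : List (String × Int)) : List (String × Int) :=
  (pvNUC.foldl (fun d i =>
    pvNUC.foldl (fun d j =>
      pvNUC.foldl (fun d k => pvAStep d (i ++ j ++ k)) d) d) (PySem.Dict.mk freq_table)).items

-- ===== PORT B =====
-- the loop of _codon_index: 'ch not in NUCLEOTIDES → return None' and 'NUCLEOTIDES.index(ch)'
-- are both PySem.List.index? (none exactly when the 1-char string is absent — exact)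
def pvCodonLoop : List Char → Int → Option Int
  | [], n => some n
  | ch :: rest, n =>
    match PySem.List.index? pvNUC (String.singleton ch) with
    | none => none
    | some i => pvCodonLoop rest (4 * n + (i : Int))

def pvCodonIndex (key : String) : Option Int :=
  if key.toList.length ≠ 3 then none else pvCodonLoop key.toList 0

-- NUCLEOTIDES[e] for e = n//16, n//4%4, n%4: every index is in 0..3 here, so getD is the
-- exact port of Python's list indexing (which would raise only out of range)
def pvDecode (n : Int) : String :=
  pvNUC.getD (PySem.Int.floordiv n 16).toNat ""
    ++ pvNUC.getD (PySem.Int.mod (PySem.Int.floordiv n 4) 4).toNat ""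
    ++ pvNUC.getD (PySem.Int.mod n 4).toNat ""

def pvMarkStep (p : List Bool) (kv : String × Int) : List Bool :=
  match pvCodonIndex kv.1 with
  | none => p
  | some idx => p.set idx.toNat true   -- present[idx] = True; 0 ≤ idx < 64 always, so exact

def suppliment_codon_usage_alt (freq_table : List (String × Int)) : List (String × Int) :=
  let present := freq_table.foldl pvMarkStep (List.replicate 64 false)
  let d := PySem.Dict.mk freq_table
  ((PySem.List.pyRange 0 64 1).foldl (fun d n =>
      -- present[n] with 0 ≤ n < 64: getD is the exact port of the list indexing
      if present.getD n.toNat false then d else d.insert (pvDecode n) 0) d).items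

-- ===== PRECONDITION & SPEC =====
def Spec_suppliment_codon_usage (freq_table : List (String × Int)) (out : List (String × Int)) : Prop := out = suppliment_codon_usage_alt freq_table
instance (freq_table : List (String × Int)) (out : List (String × Int)) : Decidable (Spec_suppliment_codon_usage freq_table out) := by unfold Spec_suppliment_codon_usage; infer_instance

-- ===== CLAIM (what is proved, stated in full; the proofs are below) =====
def Claim_equal_suppliment_codon_usage : Prop := ∀ (freq_table : List (String × Int)), Dom_suppliment_codon_usage freq_table → Spec_suppliment_codon_usage freq_table (suppliment_codon_usage freq_table)

-- ===== LEMMAS AND PROOFS =====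

-- the 64 codons in A's enumeration order
def pvAllCodons : List String :=
  pvNUC.flatMap (fun i => pvNUC.flatMap (fun j => pvNUC.map (fun k => i ++ j ++ k)))

-- folding over a flatMap is the nested fold
theorem pv_foldl_flatMap {α β γ : Type} (g : α → List β) (f : γ → β → γ) :
    ∀ (xs : List α) (d : γ),
      List.foldl f d (xs.flatMap g) = xs.foldl (fun d x => List.foldl f d (g x)) d := by
  intro xs
  induction xs with
  | nil => intro d; rfl
  | cons x rest ih => intro d; simp [List.flatMap_cons, List.foldl_append, ih]

theorem pv_nested_eq (d : PySem.Dict String Int) :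
    pvNUC.foldl (fun d i =>
      pvNUC.foldl (fun d j =>
        pvNUC.foldl (fun d k => pvAStep d (i ++ j ++ k)) d) d) d
    = List.foldl pvAStep d pvAllCodons := by
  unfold pvAllCodons
  simp only [pv_foldl_flatMap, List.foldl_map]

-- A's probe-and-insert loop over distinct keys equals filter-then-insert against the start dict
theorem pv_loop_eq (cs : List String) (hnd : cs.Nodup) :
    ∀ (d : PySem.Dict String Int),
      List.foldl pvAStep d cs
        = List.foldl (fun d c => d.insert c 0) d (cs.filter (fun c => !(d.contains c))) := by
  induction cs with
  | nil => intro d; rfl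
  | cons c rest ih =>
    intro d
    have hrest : rest.Nodup := hnd.of_cons
    have hc : c ∉ rest := (List.nodup_cons.mp hnd).1
    by_cases h : d.contains c = true
    · have hv : ∃ v, d.get? c = some v := by
        cases hg : d.get? c with
        | none => rw [PySem.Dict.get?_eq_none_iff_contains] at hg; rw [h] at hg; cases hg
        | some v => exact ⟨v, rfl⟩
      rcases hv with ⟨v, hv⟩
      simp only [List.foldl_cons, List.filter_cons, pvAStep, hv, h]
      exact ih hrest d
    · have hn : d.get? c = none := by
        rw [PySem.Dict.get?_eq_none_iff_contains]
        simpa using h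
      simp only [List.foldl_cons, List.filter_cons, pvAStep, hn, h]
      rw [ih hrest (d.insert c 0)]
      simp only [Bool.not_eq_true] at h
      have hfilt : rest.filter (fun x => !((d.insert c 0).contains x))
          = rest.filter (fun x => !(d.contains x)) := by
        apply List.filter_congr
        intro x hx
        have hxc : x ≠ c := fun he => hc (he ▸ hx)
        rw [PySem.Dict.contains_insert]
        simp [hxc]
      rw [hfilt]
      simp

set_option maxHeartbeats 2000000 in
theorem pvAllCodons_nodup : pvAllCodons.Nodup := by decide

set_option maxHeartbeats 2000000 in
theorem pvAllCodons_eq : pvAllCodons = (PySem.List.pyRange 0 64 1).map pvDecode := by decide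

theorem pvRange64_bounds : ∀ n ∈ PySem.List.pyRange 0 64 1, 0 ≤ n ∧ n < 64 := by decide

-- a successful _codon_index names a codon: the key is the decode of its index, which is in [0,64)
theorem pvCodonIndex_sound (key : String) (m : Int) (h : pvCodonIndex key = some m) :
    key = pvDecode m ∧ 0 ≤ m ∧ m < 64 := by
  unfold pvCodonIndex at h
  split_ifs at h with hlen
  simp only [Decidable.not_not] at hlen
  obtain ⟨a, b, c, habc⟩ := List.length_eq_three.mp hlen
  rw [habc] at h
  unfold pvCodonLoop at h
  cases ha : PySem.List.index? pvNUC (String.singleton a) with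
  | none => rw [ha] at h; cases h
  | some ia =>
    rw [ha] at h
    unfold pvCodonLoop at h
    cases hb : PySem.List.index? pvNUC (String.singleton b) with
    | none => rw [hb] at h; cases h
    | some ib =>
      rw [hb] at h
      unfold pvCodonLoop at h
      cases hc : PySem.List.index? pvNUC (String.singleton c) with
      | none => rw [hc] at h; cases h
      | some ic =>
        rw [hc] at h
        unfold pvCodonLoop at h
        have hm : m = 4 * (4 * (4 * 0 + (ia : Int)) + (ib : Int)) + (ic : Int) :=
          (Option.some.injEq _ _ ▸ h).symm
        obtain ⟨hka, hga, -⟩ := PySem.List.getElem_of_index?_eq_some ha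
        obtain ⟨hkb, hgb, -⟩ := PySem.List.getElem_of_index?_eq_some hb
        obtain ⟨hkc, hgc, -⟩ := PySem.List.getElem_of_index?_eq_some hc
        have hkey : key = String.ofList [a, b, c] := by
          have := congrArg String.ofList habc
          simpa using this
        simp only [pvNUC, List.length_cons, List.length_nil] at hka hkb hkc
        have hA : String.singleton a = pvNUC.getD ia "" := by
          rw [← hga]; exact (List.getD_eq_getElem _ _ hka).symm
        have hB : String.singleton b = pvNUC.getD ib "" := by
          rw [← hgb]; exact (List.getD_eq_getElem _ _ hkb).symm
        have hC : String.singleton c = pvNUC.getD ic "" := by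
          rw [← hgc]; exact (List.getD_eq_getElem _ _ hkc).symm
        subst hm hkey
        interval_cases ia <;> interval_cases ib <;> interval_cases ic <;>
          (first
            | (refine ⟨?_, by decide, by decide⟩
               have ha' := congrArg String.toList hA
               have hb' := congrArg String.toList hB
               have hc' := congrArg String.toList hC
               simp only [String.toList_singleton, pvNUC] at ha' hb' hc'
               simp at ha' hb' hc'
               subst ha' hb' hc'
               decide))

set_option maxHeartbeats 2000000 in
theorem pvCodonIndex_decode (n : Int) (h0 : 0 ≤ n) (h64 : n < 64) :
    pvCodonIndex (pvDecode n) = some n := by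
  interval_cases n <;> decide

-- the presence array holds exactly the codon indices of the scanned keys
theorem pv_present_spec :
    ∀ (ft : List (String × Int)) (p : List Bool), p.length = 64 →
      ∀ (i : Nat), i < 64 →
        (ft.foldl pvMarkStep p).getD i false
          = (p.getD i false || ft.any (fun kv => pvCodonIndex kv.1 == some (i : Int))) := by
  intro ft
  induction ft with
  | nil => intro p hp i hi; simp
  | cons kv rest ih =>
    intro p hp i hi
    simp only [List.foldl_cons, List.any_cons]
    cases hk : pvCodonIndex kv.1 with
    | none =>
      simp only [pvMarkStep, hk]
      rw [ih p hp i hi]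
      simp
    | some idx =>
      obtain ⟨-, h0, h64⟩ := pvCodonIndex_sound kv.1 idx hk
      simp only [pvMarkStep, hk]
      have hlen : (p.set idx.toNat true).length = 64 := by simpa using hp
      rw [ih _ hlen i hi]
      have hset : (p.set idx.toNat true).getD i false
          = (p.getD i false || (idx.toNat == i)) := by
        rw [List.getD_eq_getElem?_getD, List.getD_eq_getElem?_getD, List.getElem?_set]
        by_cases he : idx.toNat = i
        · simp [he, hp, hi]
        · simp [he]
      rw [hset]
      have hbeq : (some idx == some (i : Int)) = (idx.toNat == i) := by
        by_cases he : idx.toNat = i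
        · have : idx = (i : Int) := by omega
          simp [this]
        · have : idx ≠ (i : Int) := by omega
          have hl : (some idx == some (i : Int)) = false := by simp [this]
          have hr : (idx.toNat == i) = false := by simp [he]
          rw [hl, hr]
      rw [hbeq]
      cases p.getD i false <;> cases (idx.toNat == i) <;>
        cases rest.any (fun kv => pvCodonIndex kv.1 == some (i : Int)) <;> simp

-- for a codon index n, 'some key scans to n' is 'decode n is among the keys'
theorem pv_any_eq (ft : List (String × Int)) (n : Int) (h0 : 0 ≤ n) (h64 : n < 64) :
    ft.any (fun kv => pvCodonIndex kv.1 == some n)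
      = ft.any (fun kv => kv.1 == pvDecode n) := by
  apply List.any_congr rfl
  intro kv
  by_cases he : pvCodonIndex kv.1 = some n
  · obtain ⟨hk, -, -⟩ := pvCodonIndex_sound kv.1 n he
    have he' : pvCodonIndex (pvDecode n) = some n := hk ▸ he
    simp [hk, he']
  · have hne : kv.1 ≠ pvDecode n := by
      intro hkv
      exact he (hkv ▸ pvCodonIndex_decode n h0 h64)
    simp [he, hne]

-- ===== VERDICT (by name: the statement is the Claim_ definition above) =====
theorem suppliment_codon_usage_spec : Claim_equal_suppliment_codon_usage := by
  intro ft _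
  unfold Spec_suppliment_codon_usage suppliment_codon_usage suppliment_codon_usage_alt
  rw [pv_nested_eq, pv_loop_eq pvAllCodons pvAllCodons_nodup, pvAllCodons_eq]
  congr 1
  rw [List.filter_map]
  have hstep : ∀ (d : PySem.Dict String Int) (n : Int),
      (if (List.foldl pvMarkStep (List.replicate 64 false) ft).getD n.toNat false
        then d else d.insert (pvDecode n) 0)
      = (if !(List.foldl pvMarkStep (List.replicate 64 false) ft).getD n.toNat false
        then d.insert (pvDecode n) 0 else d) := by
    intro d n
    cases (List.foldl pvMarkStep (List.replicate 64 false) ft).getD n.toNat false <;> simp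
  simp only [hstep]
  have hfold := PySem.List.foldl_if_eq_foldl_filter
      (fun n : Int => !(List.foldl pvMarkStep (List.replicate 64 false) ft).getD n.toNat false)
      (fun (d : PySem.Dict String Int) n => d.insert (pvDecode n) 0)
      (PySem.List.pyRange 0 64 1) (PySem.Dict.mk ft)
  rw [hfold, List.foldl_map]
  have hfil : (PySem.List.pyRange 0 64 1).filter
        ((fun c => !((PySem.Dict.mk ft).contains c)) ∘ pvDecode)
      = (PySem.List.pyRange 0 64 1).filter
        (fun n : Int => !(List.foldl pvMarkStep (List.replicate 64 false) ft).getD n.toNat false) := by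
    apply List.filter_congr
    intro m hm
    obtain ⟨h0, h64⟩ := pvRange64_bounds m hm
    have hlen : (List.replicate 64 false).length = 64 := by simp
    have hnt : m.toNat < 64 := by omega
    rw [Function.comp_apply]
    congr 1
    rw [pv_present_spec ft _ hlen m.toNat hnt]
    have hcast : ((m.toNat : Int)) = m := by omega
    rw [hcast, pv_any_eq ft m h0 h64, PySem.Dict.contains_mk]
    have hrep : (List.replicate 64 false).getD m.toNat false = false := by
      rw [List.getD_eq_getElem?_getD, List.getElem?_replicate]
      split_ifs
      all_goals rfl
    rw [hrep, Bool.false_or]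
  rw [hfil]
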